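-- pv_equiv track=rewrite | github.com/philallen117/algo-tb-exs | w4/points_and_segments.py | bounded
-- ===== SOURCE A (Python) =====
-- def bounded(p, a):
--     # a assumed sort; return subset (i.e. prefix) of a less than or equal p
--     n = len(a)
--     left, right = 0, n
--     while True:
--         if left == right:
--             if left < n and a[left] <= p: left = left + 1
--             break
--         else: # length at least 2
--             mid = (left + right) // 2
--             amid = a[mid]
--             if amid <= p:
--                 left = mid + 1
--                 continue
--             else: # p < amid
--                 right = mid
--                 continue
--     return a[:left]
-- ===== SOURCE B (Python) =====
-- def bounded(p, a):
--     # a assumed sort; return subset (i.e. prefix) of a less than or equal p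
--     def go(lo, size):
--         if size == 0:
--             return lo + 1 if lo < len(a) and a[lo] <= p else lo
--         half = size // 2
--         if a[lo + half] <= p:
--             return go(lo + half + 1, size - half - 1)
--         return go(lo, half)
--     return a[:go(0, len(a))]
-- ===== Notes on version B (the rewrite author's own statement) =====
-- stated objective: alternative
-- what changed: Recasts A's iterative while/break/continue binary search over (left, right) with a post-loop boundary fix-up as a recursive size-halving search over (lo, size) with the fix-up folded into the base case; the probe sequence on arbitrary (possibly unsorted) input pins down the algorithm, so only the decomposition differs.
import Mathlib
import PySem

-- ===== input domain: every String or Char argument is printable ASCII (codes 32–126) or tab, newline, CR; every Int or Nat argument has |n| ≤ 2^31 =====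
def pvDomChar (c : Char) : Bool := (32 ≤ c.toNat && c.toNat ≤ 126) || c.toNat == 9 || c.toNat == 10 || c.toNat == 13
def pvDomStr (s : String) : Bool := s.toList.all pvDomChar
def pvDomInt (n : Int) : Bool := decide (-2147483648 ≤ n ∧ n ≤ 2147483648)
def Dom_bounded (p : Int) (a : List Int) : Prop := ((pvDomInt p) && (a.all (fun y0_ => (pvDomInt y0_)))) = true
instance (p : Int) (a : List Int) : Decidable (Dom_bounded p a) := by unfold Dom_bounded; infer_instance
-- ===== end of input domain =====

-- B recasts A's while/break/continue (left, right) loop with its post-loop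
-- fix-up as a recursive size-halving search on (lo, size) with the fix-up in
-- the base case (alternative decomposition; A's probe sequence on the whole
-- domain pins down the algorithm, so only the decomposition can differ).

-- ===== PORT A =====
-- 'while True' loop over (left, right); fuel = initial interval length, which
-- strictly shrinks each iteration, so the fuel-0 branch is never reached.
-- a[mid] / a[left] are ported with pyGetD 0: the indices are always in range
-- (0 ≤ left ≤ right ≤ len a is invariant), so no IndexError can occur.
def boundedLoop (p : Int) (a : List Int) : Nat → Int → Int → Int
  | fuel, left, right =>
    if left = right then
      (if left < (a.length : Int) ∧ PySem.List.pyGetD a left 0 ≤ p then left + 1 else left)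
    else
      match fuel with
      | 0 => left  -- unreachable
      | fuel + 1 =>
        let mid := PySem.Int.floordiv (left + right) 2
        if PySem.List.pyGetD a mid 0 ≤ p then boundedLoop p a fuel (mid + 1) right
        else boundedLoop p a fuel left mid

def bounded (p : Int) (a : List Int) : List Int :=
  PySem.List.slice a none (some (boundedLoop p a a.length 0 (a.length : Int)))

-- ===== PORT B =====
-- the inner recursive function go(lo, size); size is a sub-list length hence
-- a Nat, and the recursion terminates because size strictly decreases.
-- a[lo + half] is ported with pyGetD 0: lo + size ≤ len a is invariant, so the
-- probe index is always in range and no IndexError can occur.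
def altGo (p : Int) (a : List Int) (lo : Int) (size : Nat) : Int :=
  if size = 0 then
    (if lo < (a.length : Int) ∧ PySem.List.pyGetD a lo 0 ≤ p then lo + 1 else lo)
  else
    let half := size / 2
    if PySem.List.pyGetD a (lo + (half : Int)) 0 ≤ p then
      altGo p a (lo + (half : Int) + 1) (size - half - 1)
    else altGo p a lo half
  termination_by size
  decreasing_by all_goals omega

def bounded_alt (p : Int) (a : List Int) : List Int :=
  PySem.List.slice a none (some (altGo p a 0 a.length))

-- ===== PRECONDITION & SPEC =====
def Spec_bounded (p : Int) (a : List Int) (out : List Int) : Prop := out = bounded_alt p a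
instance (p : Int) (a : List Int) (out : List Int) : Decidable (Spec_bounded p a out) := by unfold Spec_bounded; infer_instance

-- ===== CLAIM (what is proved, stated in full; the proofs are below) =====
def Claim_equal_bounded : Prop := ∀ (p : Int) (a : List Int), Dom_bounded p a → Spec_bounded p a (bounded p a)

-- ===== LEMMAS AND PROOFS =====

theorem boundedLoop_base (p : Int) (a : List Int) (f : Nat) (lo : Int) :
    boundedLoop p a f lo lo =
      (if lo < (a.length : Int) ∧ PySem.List.pyGetD a lo 0 ≤ p then lo + 1 else lo) := by
  rw [boundedLoop.eq_def]; simp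

theorem boundedLoop_eq_altGo (p : Int) (a : List Int) :
    ∀ (f : Nat) (size : Nat) (lo : Int), size ≤ f →
      boundedLoop p a f lo (lo + (size : Int)) = altGo p a lo size := by
  intro f
  induction f with
  | zero =>
    intro size lo hsf
    have hz : size = 0 := by omega
    subst hz
    rw [altGo]
    simpa using boundedLoop_base p a 0 lo
  | succ f ih =>
    intro size lo hsf
    by_cases hz : size = 0
    · subst hz
      rw [altGo]
      simpa using boundedLoop_base p a (f + 1) lo
    · have hne : lo ≠ lo + (size : Int) := by omega
      rw [boundedLoop.eq_def]
      show (if lo = lo + (size : Int) then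
              (if lo < (a.length : Int) ∧ PySem.List.pyGetD a lo 0 ≤ p then lo + 1 else lo)
            else
              (if PySem.List.pyGetD a (PySem.Int.floordiv (lo + (lo + (size : Int))) 2) 0 ≤ p then
                 boundedLoop p a f (PySem.Int.floordiv (lo + (lo + (size : Int))) 2 + 1) (lo + (size : Int))
               else boundedLoop p a f lo (PySem.Int.floordiv (lo + (lo + (size : Int))) 2)))
          = altGo p a lo size
      rw [if_neg hne]
      have hmid : PySem.Int.floordiv (lo + (lo + (size : Int))) 2
          = lo + ((size / 2 : Nat) : Int) := by
        rw [PySem.Int.floordiv_eq_ediv_of_pos (by omega : (0:Int) < 2)]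
        omega
      rw [altGo, if_neg hz]
      rw [hmid]
      by_cases hc : PySem.List.pyGetD a (lo + ((size / 2 : Nat) : Int)) 0 ≤ p
      · rw [if_pos hc, if_pos hc]
        have harg : lo + (size : Int)
            = (lo + ((size / 2 : Nat) : Int) + 1) + ((size - size / 2 - 1 : Nat) : Int) := by
          omega
        rw [harg]
        exact ih (size - size / 2 - 1) (lo + ((size / 2 : Nat) : Int) + 1) (by omega)
      · rw [if_neg hc, if_neg hc]
        exact ih (size / 2) lo (by omega)

-- ===== VERDICT (by name: the statement is the Claim_ definition above) =====
theorem bounded_spec : Claim_equal_bounded := by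
  intro p a _
  unfold Spec_bounded bounded bounded_alt
  have := boundedLoop_eq_altGo p a a.length a.length 0 le_rfl
  rw [show (0 : Int) + (a.length : Int) = (a.length : Int) by omega] at this
  rw [this]
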